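-- pv_equiv track=rewrite | github.com/BS-Algo/Algorithm | minjaeYoon/2025/2025-04/0409.py | solution
-- ===== SOURCE A (Python) =====
-- def solution(str_list):
--     if not any(lst in str_list for lst in ["l", "r"]):
--         return []
--
--     for idx, lst in enumerate(str_list):
--         if lst == "l":
--             return str_list[:idx]
--         elif lst == "r":
--             return str_list[idx:]
-- ===== SOURCE B (Python) =====
-- def solution(str_list):
--     n = len(str_list)
--     l_pos = str_list.index("l") if "l" in str_list else n + 1
--     r_pos = str_list.index("r") if "r" in str_list else n + 1
--     if l_pos == n + 1 and r_pos == n + 1: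
--         return []
--     return str_list[:l_pos] if l_pos < r_pos else str_list[r_pos:]
-- ===== Notes on version B (the rewrite author's own statement) =====
-- stated objective: simpler
-- what changed: B computes the first positions of 'l' and 'r' up front (with a sentinel when absent) and decides with a single comparison-and-slice, instead of A's element-by-element enumerate loop with inline returns.
import Mathlib
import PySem

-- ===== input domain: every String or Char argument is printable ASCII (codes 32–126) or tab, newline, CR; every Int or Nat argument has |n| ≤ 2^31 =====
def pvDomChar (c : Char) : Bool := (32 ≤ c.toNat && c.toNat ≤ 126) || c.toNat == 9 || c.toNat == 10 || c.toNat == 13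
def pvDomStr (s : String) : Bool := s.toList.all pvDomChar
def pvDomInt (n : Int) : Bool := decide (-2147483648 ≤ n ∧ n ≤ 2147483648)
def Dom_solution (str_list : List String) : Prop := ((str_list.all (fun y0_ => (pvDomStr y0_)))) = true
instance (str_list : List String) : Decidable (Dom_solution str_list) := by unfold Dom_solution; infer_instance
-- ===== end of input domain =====

-- B computes the first positions of 'l' and 'r' up front and decides with one comparison-and-slice,
-- instead of A's enumerate loop with inline returns (objective: simpler).

-- ===== PORT A =====
-- the 'for idx, lst in enumerate(str_list)' loop with its inline returns; orig is str_list
def solutionLoop (orig : List String) : List String → Nat → List String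
  | [], _ => []
  | x :: xs, idx =>
    if x = "l" then orig.take idx          -- str_list[:idx]
    else if x = "r" then orig.drop idx     -- str_list[idx:]
    else solutionLoop orig xs (idx + 1)

def solution (str_list : List String) : List String :=
  if ¬ (["l", "r"].any (fun lst => str_list.contains lst)) then []
  else solutionLoop str_list str_list 0

-- ===== PORT B =====
def solution_alt (str_list : List String) : List String :=
  let n := str_list.length
  let lpos := (PySem.List.index? str_list "l").getD (n + 1)
  let rpos := (PySem.List.index? str_list "r").getD (n + 1)
  if lpos = n + 1 ∧ rpos = n + 1 then []
  else if lpos < rpos then str_list.take lpos else str_list.drop rpos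

-- ===== PRECONDITION & SPEC =====
def Spec_solution (str_list : List String) (out : List String) : Prop := out = solution_alt str_list
instance (str_list : List String) (out : List String) : Decidable (Spec_solution str_list out) := by unfold Spec_solution; infer_instance

-- ===== CLAIM (what is proved, stated in full; the proofs are below) =====
def Claim_equal_solution : Prop := ∀ (str_list : List String), Dom_solution str_list → Spec_solution str_list (solution str_list)

-- ===== LEMMAS AND PROOFS =====

lemma index?_lt_length {xs : List String} {v : String} {k : Nat}
    (h : PySem.List.index? xs v = some k) : k < xs.length := by
  obtain ⟨hk, _⟩ := PySem.List.getElem_of_index?_eq_some h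
  exact hk

lemma solutionLoop_spec (xs : List String) : ∀ (idx : Nat) (orig : List String),
    solutionLoop orig xs idx =
      match PySem.List.index? xs "l", PySem.List.index? xs "r" with
      | none, none => []
      | some i, none => orig.take (idx + i)
      | none, some j => orig.drop (idx + j)
      | some i, some j => if i < j then orig.take (idx + i) else orig.drop (idx + j) := by
  induction xs with
  | nil => intro idx orig; simp [solutionLoop, PySem.List.index?]
  | cons x xs ih =>
    intro idx orig
    by_cases hl : x = "l"
    · subst hl
      have hr : PySem.List.index? ("l" :: xs) "r"
          = (PySem.List.index? xs "r").map (· + 1) :=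
        PySem.List.index?_cons_of_ne xs (by decide)
      rw [solutionLoop, PySem.List.index?_cons_self, hr]
      cases PySem.List.index? xs "r" with
      | none => simp
      | some j => simp
    · by_cases hr : x = "r"
      · subst hr
        have hlne : PySem.List.index? ("r" :: xs) "l"
            = (PySem.List.index? xs "l").map (· + 1) :=
          PySem.List.index?_cons_of_ne xs (by decide)
        rw [solutionLoop, PySem.List.index?_cons_self, hlne]
        cases PySem.List.index? xs "l" with
        | none => simp [hl]
        | some i => simp [hl]
      · have h1 : PySem.List.index? (x :: xs) "l"
            = (PySem.List.index? xs "l").map (· + 1) :=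
          PySem.List.index?_cons_of_ne xs hl
        have h2 : PySem.List.index? (x :: xs) "r"
            = (PySem.List.index? xs "r").map (· + 1) :=
          PySem.List.index?_cons_of_ne xs hr
        rw [solutionLoop, if_neg hl, if_neg hr, h1, h2, ih (idx + 1) orig]
        cases PySem.List.index? xs "l" with
        | none =>
          cases PySem.List.index? xs "r" with
          | none => simp
          | some j => simp; omega
        | some i =>
          cases PySem.List.index? xs "r" with
          | none => simp; omega
          | some j =>
            simp only [Option.map_some]
            by_cases hij : i < j
            · rw [if_pos hij, if_pos (by omega)]; simp; omega
            · rw [if_neg hij, if_neg (by omega)]; simp; omega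

-- ===== VERDICT (by name: the statement is the Claim_ definition above) =====
theorem solution_spec : Claim_equal_solution := by
  intro str_list _
  unfold Spec_solution solution solution_alt
  rw [solutionLoop_spec]
  cases hl : PySem.List.index? str_list "l" with
  | none =>
    have hlm : "l" ∉ str_list := (PySem.List.index?_eq_none_iff str_list "l").mp hl
    cases hr : PySem.List.index? str_list "r" with
    | none =>
      have hrm : "r" ∉ str_list := (PySem.List.index?_eq_none_iff str_list "r").mp hr
      simp [hlm, hrm]
    | some j =>
      have hjl := index?_lt_length hr
      have hmem : "r" ∈ str_list := by
        by_contra h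
        simp only [(PySem.List.index?_eq_none_iff str_list "r").mpr h] at hr; cases hr
      simp only [Option.getD_none, Option.getD_some]
      rw [if_neg (by simp [hmem]), if_neg (by omega), if_neg (by omega)]
      simp
  | some i =>
    have hil := index?_lt_length hl
    have hmem : "l" ∈ str_list := by
      by_contra h
      simp only [(PySem.List.index?_eq_none_iff str_list "l").mpr h] at hl; cases hl
    cases hr : PySem.List.index? str_list "r" with
    | none =>
      simp only [Option.getD_none, Option.getD_some]
      rw [if_neg (by simp [hmem]), if_neg (by omega), if_pos (by omega)]
      simp
    | some j =>
      have hjl := index?_lt_length hr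
      have hg : ¬ (i = str_list.length + 1 ∧ j = str_list.length + 1) := by omega
      simp only [Option.getD_some]
      by_cases hij : i < j
      · simp [hmem, hg, hij]
      · simp [hmem, hg, hij]
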